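-- pv_equiv track=rewrite | github.com/koii-network/prometheus-beta | src/substring_extractor.py | extract_unique_substrings
-- ===== SOURCE A (Python) =====
-- def extract_unique_substrings(input_string):
--     """
--     Extract all unique substrings from the given input string.
--
--     Args:
--         input_string (str): The input string to extract substrings from.
--
--     Returns:
--         list: A list of unique substrings, sorted in order of first appearance.
--
--     Raises:
--         TypeError: If the input is not a string.
--     """
--     # Check input type
--     if not isinstance(input_string, str):
--         raise TypeError("Input must be a string")
--
--     # If input is empty, return empty list
--     if not input_string:
--         return []
--
--     # Use an ordered set approach to preserve first appearance order
--     unique_substrings = []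
--     seen = set()
--
--     # Iterate through all possible substrings
--     for length in range(1, len(input_string) + 1):
--         for start in range(len(input_string) - length + 1):
--             substring = input_string[start:start+length]
--
--             # Add to list if not seen before
--             if substring not in seen:
--                 unique_substrings.append(substring)
--                 seen.add(substring)
--
--     return unique_substrings
-- ===== SOURCE B (Python) =====
-- def extract_unique_substrings(input_string):
--     """Build a table of substrings in reading order (start-outer, end-inner),
--     recording each unseen substring's (length, first start), then sort by that key."""
--     if not isinstance(input_string, str):
--         raise TypeError("Input must be a string")
--     if not input_string:
--         return []
--     n = len(input_string)
--     first = {}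
--     for start in range(n):
--         for stop in range(start + 1, n + 1):
--             sub = input_string[start:stop]
--             if sub not in first:
--                 first[sub] = (stop - start, start)
--     return sorted(first, key=lambda t: first[t])
-- ===== Notes on version B (the rewrite author's own statement) =====
-- stated objective: alternative
-- what changed: A enumerates substrings length-outer/start-inner so the output is ordered by construction; B scans in natural reading order (start-outer, end-inner), records each unseen substring's (length, first start) in a dict in one pass, and obtains the ordering by a final sort on that key.
import Mathlib
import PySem

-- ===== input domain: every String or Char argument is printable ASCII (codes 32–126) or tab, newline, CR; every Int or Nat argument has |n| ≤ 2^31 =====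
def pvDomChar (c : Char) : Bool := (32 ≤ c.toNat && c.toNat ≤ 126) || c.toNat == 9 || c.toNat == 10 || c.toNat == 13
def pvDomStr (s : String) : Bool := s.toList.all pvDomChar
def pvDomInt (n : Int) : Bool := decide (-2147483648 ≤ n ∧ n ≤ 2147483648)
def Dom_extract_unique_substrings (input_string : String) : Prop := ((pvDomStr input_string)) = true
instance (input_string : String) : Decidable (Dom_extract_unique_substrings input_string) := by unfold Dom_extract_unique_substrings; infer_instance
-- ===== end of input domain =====

-- B records each substring's (length, first start) in one reading-order pass and sorts by that key,
-- instead of A's ordered-by-construction length-outer/start-inner enumeration; same cost class, different strategy.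

-- ===== PORT A =====
-- inner loop of A: for start in range(len - length + 1): …
def pvAInner (s : String) (n : Int) (length : Int) (st : List String × PySem.Set String) :
    List String × PySem.Set String :=
  (PySem.List.pyRange 0 (n - length + 1)).foldl (fun st start =>
    let substring := PySem.Str.slice s (some start) (some (start + length))
    if !(PySem.Set.contains st.2 substring) then
      (st.1 ++ [substring], PySem.Set.add st.2 substring)
    else st) st

def extract_unique_substrings (input_string : String) : List String :=
  if input_string = "" then []
  else
    let n := PySem.Str.len input_string
    ((PySem.List.pyRange 1 (n + 1)).foldl
      (fun st length => pvAInner input_string n length st)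
      ([], PySem.Set.empty)).1

-- ===== PORT B =====
-- inner loop of B: for stop in range(start + 1, n + 1): …
def pvBInner (s : String) (n : Int) (start : Int) (d : PySem.Dict String (Int × Int)) :
    PySem.Dict String (Int × Int) :=
  (PySem.List.pyRange (start + 1) (n + 1)).foldl (fun d stop =>
    let sub := PySem.Str.slice s (some start) (some stop)
    if !(d.contains sub) then d.insert sub (stop - start, start) else d) d

def extract_unique_substrings_alt (input_string : String) : List String :=
  if input_string = "" then []
  else
    let n := PySem.Str.len input_string
    let first := (PySem.List.pyRange 0 n).foldl
      (fun d start => pvBInner input_string n start d) PySem.Dict.empty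
    PySem.List.sorted2 first.keys
      (fun t => (first.getD t (0, 0)).1) (fun t => (first.getD t (0, 0)).2)

-- ===== PRECONDITION & SPEC =====
def Spec_extract_unique_substrings (input_string : String) (out : List String) : Prop := out = extract_unique_substrings_alt input_string
instance (input_string : String) (out : List String) : Decidable (Spec_extract_unique_substrings input_string out) := by unfold Spec_extract_unique_substrings; infer_instance

-- ===== CLAIM (what is proved, stated in full; the proofs are below) =====
def Claim_equal_extract_unique_substrings : Prop := ∀ (input_string : String), Dom_extract_unique_substrings input_string → Spec_extract_unique_substrings input_string (extract_unique_substrings input_string)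

-- ===== LEMMAS AND PROOFS =====

-- `input_string[i : i+L]` for natural i, L
def subS (s : String) (i L : Nat) : String :=
  PySem.Str.slice s (some (i : Int)) (some ((i : Int) + (L : Int)))

theorem toList_subS (s : String) (i L : Nat) :
    (subS s i L).toList = (s.toList.drop i).take L := by
  have h : ((i : Int) + (L : Int)) = ((i + L : Nat) : Int) := by push_cast; ring
  rw [subS, PySem.Str.toList_slice, PySem.Chars.slice_eq_listSlice, h, PySem.List.slice_natCast]
  congr 1
  omega

theorem length_subS (s : String) (i L : Nat) (h : i + L ≤ s.toList.length) :
    (subS s i L).toList.length = L := by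
  rw [toList_subS, List.length_take, List.length_drop]
  omega

theorem subS_ne_of_length_ne (s : String) {i L j M : Nat}
    (hi : i + L ≤ s.toList.length) (hj : j + M ≤ s.toList.length) (h : L ≠ M) :
    subS s i L ≠ subS s j M := by
  intro he
  apply h
  have := congrArg (fun t => t.toList.length) he
  simpa [length_subS s i L hi, length_subS s j M hj] using this

-- A's block for a fixed length L: first occurrences, in start order
def blockA (s : String) (N L : Nat) : List String :=
  ((List.range (N - L + 1)).filter
    (fun i => decide (∀ j < i, subS s j L ≠ subS s i L))).map (fun i => subS s i L)

def allA (s : String) (N : Nat) : List String :=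
  (List.range N).flatMap (fun l => blockA s N (l + 1))

def stepA (s : String) (L : Nat) (st : List String × PySem.Set String) (i : Nat) :
    List String × PySem.Set String :=
  if !(PySem.Set.contains st.2 (subS s i L)) then
    (st.1 ++ [subS s i L], PySem.Set.add st.2 (subS s i L))
  else st

def foldA (s : String) (L m : Nat) (acc : List String) (seen : PySem.Set String) :
    List String × PySem.Set String :=
  (List.range m).foldl (stepA s L) (acc, seen)

def condA (s : String) (L : Nat) (seen : PySem.Set String) (i : Nat) : Bool :=
  !(PySem.Set.contains seen (subS s i L)) && decide (∀ j < i, subS s j L ≠ subS s i L)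

theorem foldA_spec (s : String) (L : Nat) (m : Nat) (acc : List String) (seen : PySem.Set String) :
    ((foldA s L m acc seen).1
      = acc ++ (((List.range m).filter (condA s L seen)).map (fun i => subS s i L)))
    ∧ ∀ t, t ∈ (foldA s L m acc seen).2 ↔ t ∈ seen ∨ ∃ i < m, t = subS s i L := by
  induction m with
  | zero => simp [foldA]
  | succ m ih =>
    obtain ⟨ih1, ih2⟩ := ih
    have hfold : foldA s L (m + 1) acc seen = stepA s L (foldA s L m acc seen) m := by
      simp [foldA, List.range_succ]
    by_cases hmem : subS s m L ∈ (foldA s L m acc seen).2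
    · have hc : PySem.Set.contains (foldA s L m acc seen).2 (subS s m L) = true := by
        rw [PySem.Set.contains_iff]; exact hmem
      have hstep : foldA s L (m + 1) acc seen = foldA s L m acc seen := by
        rw [hfold, stepA, hc]; simp
      have hcond : condA s L seen m = false := by
        rcases (ih2 (subS s m L)).1 hmem with h | ⟨i, hi, he⟩
        · simp [condA, h]
        · simp only [condA, Bool.and_eq_false_iff]
          right
          simp only [decide_eq_false_iff_not, not_forall]
          exact ⟨i, hi, by simp [he]⟩
      constructor
      · rw [hstep, ih1, List.range_succ, List.filter_append]
        simp [hcond]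
      · intro t
        rw [hstep, ih2 t]
        constructor
        · rintro (h | ⟨i, hi, he⟩)
          · exact Or.inl h
          · exact Or.inr ⟨i, by omega, he⟩
        · rintro (h | ⟨i, hi, he⟩)
          · exact Or.inl h
          · by_cases him : i < m
            · exact Or.inr ⟨i, him, he⟩
            · have : i = m := by omega
              subst this
              subst he
              exact (ih2 _).1 hmem
    · have hc : PySem.Set.contains (foldA s L m acc seen).2 (subS s m L) = false := by
        rw [← Bool.not_eq_true, PySem.Set.contains_iff]; exact hmem
      have hstep : foldA s L (m + 1) acc seen
          = ((foldA s L m acc seen).1 ++ [subS s m L],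
             PySem.Set.add (foldA s L m acc seen).2 (subS s m L)) := by
        rw [hfold, stepA, hc]; simp
      have hcond : condA s L seen m = true := by
        simp only [condA, Bool.and_eq_true, Bool.not_eq_true', decide_eq_true_eq]
        constructor
        · rw [← Bool.not_eq_true, PySem.Set.contains_iff]
          intro h
          exact hmem ((ih2 _).2 (Or.inl h))
        · intro j hj he
          exact hmem ((ih2 _).2 (Or.inr ⟨j, hj, he.symm⟩))
      constructor
      · rw [hstep, ih1, List.range_succ, List.filter_append]
        simp [hcond]
      · intro t
        rw [hstep]
        simp only [PySem.Set.mem_add, ih2 t]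
        constructor
        · rintro ((h | ⟨i, hi, he⟩) | he)
          · exact Or.inl h
          · exact Or.inr ⟨i, by omega, he⟩
          · exact Or.inr ⟨m, by omega, he⟩
        · rintro (h | ⟨i, hi, he⟩)
          · exact Or.inl (Or.inl h)
          · by_cases him : i < m
            · exact Or.inl (Or.inr ⟨i, him, he⟩)
            · have : i = m := by omega
              subst this
              exact Or.inr he

-- pvAInner in Nat form
theorem pvAInner_eq (s : String) (N l : Nat) (hl : l < N) (st : List String × PySem.Set String) :
    pvAInner s (N : Int) ((1 : Int) + (l : Int)) st
      = (List.range (N - l)).foldl (stepA s (l + 1)) st := by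
  rw [pvAInner]
  have h1 : (N : Int) - ((1 : Int) + (l : Int)) + 1 = ((N - l : Nat) : Int) := by
    have : ((N - l : Nat) : Int) = (N : Int) - (l : Int) := by
      omega
    omega
  rw [h1, PySem.List.pyRange_zero_natCast, List.foldl_map]
  congr 1
  funext st' k
  have h2 : (k : Int) + ((1 : Int) + (l : Int)) = (k : Int) + ((l + 1 : Nat) : Int) := by
    push_cast; ring
  simp only [h2]
  rfl

-- characterization of A's whole loop
theorem A_loop_spec (s : String) (N : Nat) (hN : s.toList.length = N) (p : Nat) (hp : p ≤ N) :
    (((List.range p).foldl (fun st (l : Nat) => pvAInner s (N : Int) ((1 : Int) + (l : Int)) st)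
        ([], PySem.Set.empty)).1
      = (List.range p).flatMap (fun l => blockA s N (l + 1)))
    ∧ ∀ t, t ∈ ((List.range p).foldl (fun st (l : Nat) => pvAInner s (N : Int) ((1 : Int) + (l : Int)) st)
        ([], PySem.Set.empty)).2 ↔ ∃ L i, 1 ≤ L ∧ L ≤ p ∧ i + L ≤ N ∧ t = subS s i L := by
  induction p with
  | zero =>
    constructor
    · simp
    · intro t
      simp only [List.range_zero, List.foldl_nil]
      constructor
      · intro h
        simp [PySem.Set.empty] at h
      · rintro ⟨L, i, h1, h2, -, -⟩
        omega
  | succ p ih =>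
    have hpN : p < N := by omega
    obtain ⟨ih1, ih2⟩ := ih (by omega)
    set F := ((List.range p).foldl (fun st (l : Nat) => pvAInner s (N : Int) ((1 : Int) + (l : Int)) st)
        ([], PySem.Set.empty)) with hF
    have hstep : ((List.range (p + 1)).foldl
          (fun st (l : Nat) => pvAInner s (N : Int) ((1 : Int) + (l : Int)) st) ([], PySem.Set.empty))
        = foldA s (p + 1) (N - p) F.1 F.2 := by
      rw [List.range_succ, List.foldl_append]
      simp only [List.foldl_cons, List.foldl_nil]
      rw [← hF, pvAInner_eq s N p hpN, foldA]
    obtain ⟨h1, h2⟩ := foldA_spec s (p + 1) (N - p) F.1 F.2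
    -- in phase p+1 nothing of length p+1 is in the old seen set
    have hfresh : ∀ i ∈ List.range (N - p), condA s (p + 1) F.2 i
        = decide (∀ j < i, subS s j (p + 1) ≠ subS s i (p + 1)) := by
      intro i hi
      rw [List.mem_range] at hi
      have hiN : i + (p + 1) ≤ N := by omega
      have hnot : subS s i (p + 1) ∉ F.2 := by
        intro hmem
        rcases (ih2 _).1 hmem with ⟨L', i', hL1, hL2, hi', he⟩
        exact subS_ne_of_length_ne s (by omega : i + (p + 1) ≤ s.toList.length)
          (by omega : i' + L' ≤ s.toList.length) (by omega) he
      have hcf : PySem.Set.contains F.2 (subS s i (p + 1)) = false := by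
        rw [← Bool.not_eq_true, PySem.Set.contains_iff]; exact hnot
      simp only [condA]
      rw [hcf]
      simp
    have hrange : N - (p + 1) + 1 = N - p := by omega
    have hblock : blockA s N (p + 1)
        = ((List.range (N - p)).filter (condA s (p + 1) F.2)).map
            (fun i => subS s i (p + 1)) := by
      rw [blockA, hrange, ← List.filter_congr hfresh]
    constructor
    · rw [hstep, h1, ih1, List.range_succ, List.flatMap_append, ← hblock]
      simp
    · intro t
      rw [hstep, h2 t, ih2 t]
      constructor
      · rintro (⟨L, i, hL1, hL2, hiL, he⟩ | ⟨i, hi, he⟩)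
        · exact ⟨L, i, hL1, by omega, hiL, he⟩
        · exact ⟨p + 1, i, by omega, by omega, by omega, he⟩
      · rintro ⟨L, i, hL1, hL2, hiL, he⟩
        by_cases hLp : L ≤ p
        · exact Or.inl ⟨L, i, hL1, hLp, hiL, he⟩
        · have : L = p + 1 := by omega
          subst this
          exact Or.inr ⟨i, by omega, he⟩

theorem A_eq_allA (s : String) (hs : s ≠ "") :
    extract_unique_substrings s = allA s s.toList.length := by
  have hlen : PySem.Str.len s = ((s.toList.length : Nat) : Int) := PySem.Str.len_eq s
  have htn : (((s.toList.length : Nat) : Int) + 1 - 1).toNat = s.toList.length := by omega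
  simp only [extract_unique_substrings, if_neg hs, hlen]
  rw [PySem.List.pyRange_one, htn, List.foldl_map]
  exact (A_loop_spec s s.toList.length rfl s.toList.length le_rfl).1

-- B's inner loop, in Nat form
def stepB (s : String) (i : Nat) (d : PySem.Dict String (Int × Int)) (l : Nat) :
    PySem.Dict String (Int × Int) :=
  if !(d.contains (subS s i (l + 1))) then
    d.insert (subS s i (l + 1)) (((l : Int) + 1), (i : Int))
  else d

def foldB (s : String) (i m : Nat) (d : PySem.Dict String (Int × Int)) :
    PySem.Dict String (Int × Int) :=
  (List.range m).foldl (stepB s i) d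

theorem foldB_spec (s : String) (N : Nat) (hN : s.toList.length = N) (i : Nat)
    (m : Nat) (hm : i + m ≤ N) (d : PySem.Dict String (Int × Int)) :
    (∀ t, t ∈ (foldB s i m d).keys ↔ t ∈ d.keys ∨ ∃ l < m, t = subS s i (l + 1))
    ∧ (∀ t v0, t ∈ d.keys → (foldB s i m d).getD t v0 = d.getD t v0)
    ∧ (∀ l v0, l < m → subS s i (l + 1) ∉ d.keys →
        (foldB s i m d).getD (subS s i (l + 1)) v0 = (((l : Int) + 1), (i : Int)))
    ∧ (d.keys.Nodup → (foldB s i m d).keys.Nodup) := by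
  induction m with
  | zero =>
    refine ⟨by simp [foldB], by simp [foldB], by simp, fun h => by simpa [foldB] using h⟩
  | succ m ih =>
    obtain ⟨ih1, ih2, ih3, ih4⟩ := ih (by omega)
    have hlen : ∀ l : Nat, l < m + 1 → i + (l + 1) ≤ s.toList.length := by omega
    have hkey_ne : ∀ l : Nat, l < m → subS s i (l + 1) ≠ subS s i (m + 1) := by
      intro l hl
      exact subS_ne_of_length_ne s (hlen l (by omega)) (hlen m (by omega)) (by omega)
    have hfold : foldB s i (m + 1) d = stepB s i (foldB s i m d) m := by
      simp [foldB, List.range_succ]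
    by_cases hmem : subS s i (m + 1) ∈ (foldB s i m d).keys
    · have hc : (foldB s i m d).contains (subS s i (m + 1)) = true :=
        (PySem.Dict.contains_iff_mem_keys _ _).2 hmem
      have hstep : foldB s i (m + 1) d = foldB s i m d := by
        rw [hfold, stepB, hc]; simp
      refine ⟨?_, ?_, ?_, ?_⟩
      · intro t
        rw [hstep, ih1 t]
        constructor
        · rintro (h | ⟨l, hl, he⟩)
          · exact Or.inl h
          · exact Or.inr ⟨l, by omega, he⟩
        · rintro (h | ⟨l, hl, he⟩)
          · exact Or.inl h
          · by_cases hlm : l < m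
            · exact Or.inr ⟨l, hlm, he⟩
            · have : l = m := by omega
              subst this; subst he
              exact (ih1 _).1 hmem
      · intro t v0 ht
        rw [hstep]; exact ih2 t v0 ht
      · intro l v0 hl hnd
        by_cases hlm : l < m
        · rw [hstep]; exact ih3 l v0 hlm hnd
        · have hlm' : l = m := by omega
          subst hlm'
          rw [hstep]
          rcases (ih1 _).1 hmem with h | ⟨l', hl', he⟩
          · exact absurd h hnd
          · exact absurd he.symm (hkey_ne l' hl')
      · intro h; rw [hstep]; exact ih4 h
    · have hc : (foldB s i m d).contains (subS s i (m + 1)) = false := by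
        rw [← Bool.not_eq_true, PySem.Dict.contains_iff_mem_keys]; exact hmem
      have hstep : foldB s i (m + 1) d
          = (foldB s i m d).insert (subS s i (m + 1)) (((m : Int) + 1), (i : Int)) := by
        rw [hfold, stepB, hc]; simp
      refine ⟨?_, ?_, ?_, ?_⟩
      · intro t
        rw [hstep, PySem.Dict.mem_keys_insert, ih1 t]
        constructor
        · rintro (he | h | ⟨l, hl, he⟩)
          · exact Or.inr ⟨m, by omega, he⟩
          · exact Or.inl h
          · exact Or.inr ⟨l, by omega, he⟩
        · rintro (h | ⟨l, hl, he⟩)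
          · exact Or.inr (Or.inl h)
          · by_cases hlm : l < m
            · exact Or.inr (Or.inr ⟨l, hlm, he⟩)
            · have : l = m := by omega
              subst this
              exact Or.inl he
      · intro t v0 ht
        rw [hstep, PySem.Dict.getD_insert_of_ne]
        · exact ih2 t v0 ht
        · intro he
          subst he
          exact hmem ((ih1 _).2 (Or.inl ht))
      · intro l v0 hl hnd
        by_cases hlm : l < m
        · rw [hstep, PySem.Dict.getD_insert_of_ne _ _ _ (hkey_ne l hlm)]
          exact ih3 l v0 hlm hnd
        · have : l = m := by omega
          subst this
          rw [hstep, PySem.Dict.getD_insert_self]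
      · intro h
        rw [hstep]
        exact PySem.Dict.nodup_keys_insert _ _ _ (ih4 h)

-- pvBInner in Nat form
theorem pvBInner_eq (s : String) (N i : Nat) (d : PySem.Dict String (Int × Int)) :
    pvBInner s (N : Int) (i : Int) d = foldB s i (N - i) d := by
  rw [pvBInner]
  have h1 : ((N : Int) + 1 - ((i : Int) + 1)).toNat = N - i := by omega
  rw [PySem.List.pyRange_one, h1, List.foldl_map, foldB]
  congr 1
  funext d' k
  have h2 : (i : Int) + 1 + (k : Int) = (i : Int) + ((k + 1 : Nat) : Int) := by push_cast; ring
  have h4 : (i : Int) + ((k + 1 : Nat) : Int) - (i : Int) = (k : Int) + 1 := by push_cast; ring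
  simp only [h2, h4, stepB, subS]

-- B's outer loop characterization
theorem B_loop_spec (s : String) (N : Nat) (hN : s.toList.length = N) (p : Nat) (hp : p ≤ N) :
    (∀ t, t ∈ ((List.range p).foldl (fun d (i : Nat) => pvBInner s (N : Int) (i : Int) d)
        PySem.Dict.empty).keys ↔ ∃ i L, i < p ∧ 1 ≤ L ∧ i + L ≤ N ∧ t = subS s i L)
    ∧ ((List.range p).foldl (fun d (i : Nat) => pvBInner s (N : Int) (i : Int) d)
        PySem.Dict.empty).keys.Nodup
    ∧ (∀ i L v0, i < p → 1 ≤ L → i + L ≤ N → (∀ j < i, subS s j L ≠ subS s i L) →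
        ((List.range p).foldl (fun d (i : Nat) => pvBInner s (N : Int) (i : Int) d)
          PySem.Dict.empty).getD (subS s i L) v0 = ((L : Int), (i : Int))) := by
  induction p with
  | zero =>
    refine ⟨?_, by simp [PySem.Dict.empty], by omega⟩
    intro t
    simp only [List.range_zero, List.foldl_nil]
    constructor
    · intro h; simp [PySem.Dict.empty, PySem.Dict.keys] at h
    · rintro ⟨i, L, hi, -, -, -⟩; omega
  | succ p ih =>
    obtain ⟨ih1, ih2, ih3⟩ := ih (by omega)
    set G := ((List.range p).foldl (fun d (i : Nat) => pvBInner s (N : Int) (i : Int) d)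
        PySem.Dict.empty) with hG
    have hstep : ((List.range (p + 1)).foldl (fun d (i : Nat) => pvBInner s (N : Int) (i : Int) d)
        PySem.Dict.empty) = foldB s p (N - p) G := by
      rw [List.range_succ, List.foldl_append]
      simp only [List.foldl_cons, List.foldl_nil]
      rw [← hG, pvBInner_eq]
    obtain ⟨b1, b2, b3, b4⟩ := foldB_spec s N hN p (N - p) (by omega) G
    refine ⟨?_, ?_, ?_⟩
    · intro t
      rw [hstep, b1 t]
      constructor
      · rintro (h | ⟨l, hl, he⟩)
        · obtain ⟨i, L, hi, h⟩ := (ih1 t).1 h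
          exact ⟨i, L, by omega, h⟩
        · exact ⟨p, l + 1, by omega, by omega, by omega, he⟩
      · rintro ⟨i, L, hi, hL, hiL, he⟩
        by_cases hip : i < p
        · exact Or.inl ((ih1 t).2 ⟨i, L, hip, hL, hiL, he⟩)
        · have : i = p := by omega
          subst this
          refine Or.inr ⟨L - 1, by omega, ?_⟩
          have : L - 1 + 1 = L := by omega
          rw [this]; exact he
    · rw [hstep]; exact b4 ih2
    · intro i L v0 hi hL hiL hfst
      rw [hstep]
      by_cases hip : i < p
      · rw [b2 _ v0 ((ih1 _).2 ⟨i, L, hip, hL, hiL, rfl⟩)]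
        exact ih3 i L v0 hip hL hiL hfst
      · have hip' : i = p := by omega
        subst hip'
        have hnot : subS s i L ∉ G.keys := by
          intro h
          obtain ⟨i', L', hi', hL', hiL', he⟩ := (ih1 _).1 h
          by_cases hLL : L' = L
          · subst hLL
            exact hfst i' hi' he.symm
          · exact subS_ne_of_length_ne s (by omega) (by omega) (fun hc => hLL hc.symm) he
        have hL1 : L - 1 + 1 = L := by omega
        have := b3 (L - 1) v0 (by omega) (by rw [hL1]; exact hnot)
        rw [hL1] at this
        rw [this]
        have : ((L - 1 : Nat) : Int) + 1 = (L : Int) := by omega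
        rw [this]

theorem sorted2_eq_sorted_lex {α : Type} (xs : List α) (k1 k2 : α → Int) :
    PySem.List.sorted2 xs k1 k2 = PySem.List.sorted xs (fun x => toLex (k1 x, k2 x)) := by
  have hbe : (fun (a b : α) => decide (k1 a < k1 b) || (!decide (k1 b < k1 a) && decide (k2 a < k2 b)))
      = fun a b => decide (toLex (k1 a, k2 a) < toLex (k1 b, k2 b)) := by
    funext a b
    rcases lt_trichotomy (k1 a) (k1 b) with h | h | h
    all_goals simp [Prod.Lex.toLex_lt_toLex, h]
    all_goals omega
  simp only [PySem.List.sorted2, PySem.List.sorted, hbe]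
  simp

-- B's dict, with the loop already in Nat form
def dictB (s : String) (N : Nat) : PySem.Dict String (Int × Int) :=
  (List.range N).foldl (fun d (i : Nat) => pvBInner s (N : Int) (i : Int) d) PySem.Dict.empty

theorem dictB_getD (s : String) (N : Nat) (hN : s.toList.length = N) {i L : Nat}
    (hL : 1 ≤ L) (hiL : i + L ≤ N) (hfst : ∀ j < i, subS s j L ≠ subS s i L) :
    (dictB s N).getD (subS s i L) (0, 0) = ((L : Int), (i : Int)) :=
  (B_loop_spec s N hN N le_rfl).2.2 i L (0, 0) (by omega) hL hiL hfst

theorem mem_blockA' {s : String} {N L : Nat} {x : String} (hx : x ∈ blockA s N L) :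
    ∃ i, i ≤ N - L ∧ (∀ j < i, subS s j L ≠ subS s i L) ∧ x = subS s i L := by
  rw [blockA, List.mem_map] at hx
  obtain ⟨i, hi, he⟩ := hx
  rw [List.mem_filter, List.mem_range] at hi
  obtain ⟨hir, hp⟩ := hi
  rw [decide_eq_true_eq] at hp
  exact ⟨i, by omega, hp, he.symm⟩

theorem mem_allA (s : String) (N : Nat) (t : String) :
    t ∈ allA s N ↔ ∃ i L, 1 ≤ L ∧ i + L ≤ N ∧ t = subS s i L := by
  constructor
  · intro h
    rw [allA, List.mem_flatMap] at h
    obtain ⟨l, hl, hx⟩ := h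
    rw [List.mem_range] at hl
    obtain ⟨i, hi, -, he⟩ := mem_blockA' hx
    exact ⟨i, l + 1, by omega, by omega, he⟩
  · rintro ⟨i, L, hL, hiL, rfl⟩
    have hexists : ∃ j, subS s j L = subS s i L := ⟨i, rfl⟩
    have hspec : subS s (Nat.find hexists) L = subS s i L := Nat.find_spec hexists
    have hle : Nat.find hexists ≤ i := Nat.find_min' hexists rfl
    rw [allA, List.mem_flatMap]
    have hL1 : L - 1 + 1 = L := by omega
    refine ⟨L - 1, by rw [List.mem_range]; omega, ?_⟩
    rw [blockA, hL1, List.mem_map]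
    refine ⟨Nat.find hexists, ?_, hspec⟩
    rw [List.mem_filter, List.mem_range, decide_eq_true_eq]
    refine ⟨by omega, ?_⟩
    intro j hj he
    exact Nat.find_min hexists hj (he.trans hspec)

theorem pairwise_allA (s : String) (N : Nat) (hN : s.toList.length = N) :
    (allA s N).Pairwise (fun a b =>
      toLex ((dictB s N).getD a (0, 0)) < toLex ((dictB s N).getD b (0, 0))) := by
  rw [allA, List.pairwise_flatMap]
  constructor
  · intro l hl
    rw [List.mem_range] at hl
    rw [blockA, List.pairwise_map]
    have hbase : (List.filter (fun i => decide (∀ j < i, subS s j (l + 1) ≠ subS s i (l + 1)))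
        (List.range (N - (l + 1) + 1))).Pairwise (· < ·) :=
      List.Pairwise.sublist List.filter_sublist List.pairwise_lt_range
    refine hbase.imp_of_mem ?_
    intro a b ha hb hab
    rw [List.mem_filter, List.mem_range, decide_eq_true_eq] at ha hb
    rw [dictB_getD s N hN (by omega) (by omega) ha.2, dictB_getD s N hN (by omega) (by omega) hb.2]
    rw [Prod.Lex.toLex_lt_toLex]
    exact Or.inr ⟨rfl, by omega⟩
  · refine List.pairwise_lt_range.imp_of_mem ?_
    intro a b ha hb hab x hx y hy
    rw [List.mem_range] at ha hb
    obtain ⟨i, hi, hfi, rfl⟩ := mem_blockA' hx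
    obtain ⟨i', hi', hfi', rfl⟩ := mem_blockA' hy
    rw [dictB_getD s N hN (by omega) (by omega) hfi, dictB_getD s N hN (by omega) (by omega) hfi']
    rw [Prod.Lex.toLex_lt_toLex]
    left
    omega

theorem nodup_allA (s : String) (N : Nat) (hN : s.toList.length = N) : (allA s N).Nodup :=
  (pairwise_allA s N hN).imp (fun h heq => absurd (heq ▸ h) (lt_irrefl _))

theorem alt_eq_allA (s : String) (hs : s ≠ "") :
    extract_unique_substrings_alt s = allA s s.toList.length := by
  have hlen : PySem.Str.len s = ((s.toList.length : Nat) : Int) := PySem.Str.len_eq s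
  simp only [extract_unique_substrings_alt, if_neg hs, hlen]
  rw [PySem.List.pyRange_zero_natCast, List.foldl_map]
  rw [show ((List.range s.toList.length).foldl
        (fun d (i : Nat) => pvBInner s ((s.toList.length : Nat) : Int) (i : Int) d)
        PySem.Dict.empty) = dictB s s.toList.length from rfl]
  rw [sorted2_eq_sorted_lex]
  obtain ⟨k1, k2, -⟩ := B_loop_spec s s.toList.length rfl s.toList.length le_rfl
  have hperm : (allA s s.toList.length).Perm (dictB s s.toList.length).keys := by
    rw [dictB]
    rw [List.perm_ext_iff_of_nodup (nodup_allA s s.toList.length rfl) k2]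
    intro t
    rw [mem_allA, k1 t]
    constructor
    · rintro ⟨i, L, hL, hiL, he⟩
      exact ⟨i, L, by omega, hL, hiL, he⟩
    · rintro ⟨i, L, -, hL, hiL, he⟩
      exact ⟨i, L, hL, hiL, he⟩
  refine PySem.List.sorted_eq_of_perm_of_pairwise_lt _ _ _ hperm ?_
  simp only [Prod.mk.eta]
  exact pairwise_allA s s.toList.length rfl

-- ===== VERDICT (by name: the statement is the Claim_ definition above) =====
theorem extract_unique_substrings_spec : Claim_equal_extract_unique_substrings := by
  intro s _
  unfold Spec_extract_unique_substrings
  by_cases hs : s = ""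
  · subst hs
    simp [extract_unique_substrings, extract_unique_substrings_alt]
  · rw [A_eq_allA s hs, alt_eq_allA s hs]
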